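-- pv_equiv track=rewrite | github.com/grapheneaffiliate/h4-polytopic-attention | solve_arc1_recovery.py | solve_dbc1a6ce
-- ===== SOURCE A (Python) =====
-- def solve_dbc1a6ce(grid):
--     """Connect pairs of 1s on same row/col with 8s between them."""
--     rows, cols = len(grid), len(grid[0])
--     out = [row[:] for row in grid]
--     ones = [(r, c) for r in range(rows) for c in range(cols) if grid[r][c] == 1]
--     for i in range(len(ones)):
--         for j in range(i+1, len(ones)):
--             r1, c1 = ones[i]
--             r2, c2 = ones[j]
--             if r1 == r2:
--                 for c in range(min(c1, c2)+1, max(c1, c2)):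
--                     if out[r1][c] == 0:
--                         out[r1][c] = 8
--             elif c1 == c2:
--                 for r in range(min(r1, r2)+1, max(r1, r2)):
--                     if out[r][c1] == 0:
--                         out[r][c1] = 8
--     return out
-- ===== SOURCE B (Python) =====
-- def solve_dbc1a6ce(grid):
--     """Connect pairs of 1s on same row/col with 8s between them.
--     One fill per row/column, from its first 1 to its last 1,
--     instead of a fill per pair of 1s."""
--     rows, cols = len(grid), len(grid[0])
--     out = [row[:] for row in grid]
--     for r in range(rows):
--         cs = [c for c in range(cols) if grid[r][c] == 1]
--         if len(cs) >= 2: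
--             for c in range(cs[0] + 1, cs[-1]):
--                 if out[r][c] == 0:
--                     out[r][c] = 8
--     for c in range(cols):
--         rs = [r for r in range(rows) if grid[r][c] == 1]
--         if len(rs) >= 2:
--             for r in range(rs[0] + 1, rs[-1]):
--                 if out[r][c] == 0:
--                     out[r][c] = 8
--     return out
-- ===== Notes on version B (the rewrite author's own statement) =====
-- stated objective: alternative
-- what changed: Instead of scanning all O(k^2) pairs of 1s and filling between each pair, B groups the 1s per row and per column and fills each row/column once from its first to its last 1 (the union of all pairwise open intervals equals the open interval between the extremes, and only 0-cells are overwritten).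
import Mathlib
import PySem

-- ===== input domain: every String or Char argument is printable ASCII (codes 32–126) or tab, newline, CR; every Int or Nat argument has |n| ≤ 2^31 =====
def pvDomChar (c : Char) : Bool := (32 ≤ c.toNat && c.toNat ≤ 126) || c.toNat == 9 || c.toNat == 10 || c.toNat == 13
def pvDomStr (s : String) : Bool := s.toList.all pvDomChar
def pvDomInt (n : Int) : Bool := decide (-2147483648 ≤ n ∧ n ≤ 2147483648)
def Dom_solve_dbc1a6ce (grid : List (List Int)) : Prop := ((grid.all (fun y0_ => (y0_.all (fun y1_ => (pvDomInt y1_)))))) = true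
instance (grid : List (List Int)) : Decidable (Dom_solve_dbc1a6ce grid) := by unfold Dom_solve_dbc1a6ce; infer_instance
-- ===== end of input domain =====

-- B fills each row/column once, from its first 1 to its last 1, instead of filling between every pair of 1s (alternative algorithm, same result since only 0-cells are overwritten).


-- ===== PORT A =====
-- shared primitive: Python's «if out[r][c] == 0: out[r][c] = 8» (both sources contain this statement verbatim)
def pvCell (g : List (List Int)) (r c : Nat) : Int := (g.getD r []).getD c 0

def pvSet8 (out : List (List Int)) (r c : Nat) : List (List Int) :=
  out.modify r (fun row => row.modify c (fun v => if v = 0 then 8 else v))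

-- Python's range(lo+1, hi)
def pvSeg (lo hi : Nat) : List Nat := List.range' (lo + 1) (hi - (lo + 1))

-- «for c in range(lo+1, hi): if out[r][c] == 0: out[r][c] = 8»
def pvFillRow (out : List (List Int)) (r lo hi : Nat) : List (List Int) :=
  (pvSeg lo hi).foldl (fun o c => pvSet8 o r c) out

-- «for r in range(lo+1, hi): if out[r][c] == 0: out[r][c] = 8»
def pvFillCol (out : List (List Int)) (c lo hi : Nat) : List (List Int) :=
  (pvSeg lo hi).foldl (fun o r => pvSet8 o r c) out

-- «[c for c in range(cols) if grid[r][c] == 1]»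
def pvRowOnes (grid : List (List Int)) (r : Nat) : List Nat :=
  (List.range (grid.headD []).length).filter (fun c => pvCell grid r c = 1)

-- «[r for r in range(rows) if grid[r][c] == 1]»
def pvColOnes (grid : List (List Int)) (c : Nat) : List Nat :=
  (List.range grid.length).filter (fun r => pvCell grid r c = 1)

-- «ones = [(r, c) for r in range(rows) for c in range(cols) if grid[r][c] == 1]»
def pvOnes (grid : List (List Int)) : List (Nat × Nat) :=
  (List.range grid.length).flatMap (fun r => (pvRowOnes grid r).map (fun c => (r, c)))

def solve_dbc1a6ce (grid : List (List Int)) : List (List Int) :=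
  let ones := pvOnes grid
  (List.range ones.length).foldl (fun out i =>
    (List.range' (i + 1) (ones.length - (i + 1))).foldl (fun out j =>
      let p := ones.getD i (0, 0)
      let q := ones.getD j (0, 0)
      if p.1 = q.1 then pvFillRow out p.1 (min p.2 q.2) (max p.2 q.2)
      else if p.2 = q.2 then pvFillCol out p.2 (min p.1 q.1) (max p.1 q.1)
      else out) out) grid

-- ===== PORT B =====
def solve_dbc1a6ce_alt (grid : List (List Int)) : List (List Int) :=
  let out1 := (List.range grid.length).foldl (fun out r =>
      let cs := pvRowOnes grid r
      if 2 ≤ cs.length then pvFillRow out r (cs.headD 0) (cs.getLastD 0) else out) grid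
  (List.range (grid.headD []).length).foldl (fun out c =>
      let rs := pvColOnes grid c
      if 2 ≤ rs.length then pvFillCol out c (rs.headD 0) (rs.getLastD 0) else out) out1

-- ===== PRECONDITION & SPEC =====
-- Pre_ excludes exactly the inputs on which A raises: the empty grid (grid[0] → IndexError)
-- and grids where some row is shorter than the first row (grid[r][c] / out[r][c] → IndexError).
def Pre_solve_dbc1a6ce (grid : List (List Int)) : Prop :=
  grid ≠ [] ∧ ∀ row ∈ grid, (grid.headD []).length ≤ row.length
instance (grid : List (List Int)) : Decidable (Pre_solve_dbc1a6ce grid) := by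
  unfold Pre_solve_dbc1a6ce; infer_instance

def pvWitness_solve_dbc1a6ce : List (List Int) := [[1, 0, 1], [0, 0, 0], [1, 0, 0]]

def Spec_solve_dbc1a6ce (grid : List (List Int)) (out : List (List Int)) : Prop := out = solve_dbc1a6ce_alt grid
instance (grid : List (List Int)) (out : List (List Int)) : Decidable (Spec_solve_dbc1a6ce grid out) := by unfold Spec_solve_dbc1a6ce; infer_instance

-- ===== CLAIM (what is proved, stated in full; the proofs are below) =====
def Claim_equal_solve_dbc1a6ce : Prop := ∀ (grid : List (List Int)), Dom_solve_dbc1a6ce grid → Pre_solve_dbc1a6ce grid → Spec_solve_dbc1a6ce grid (solve_dbc1a6ce grid)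

-- ===== LEMMAS AND PROOFS =====

def applyCells (out : List (List Int)) (ps : List (Nat × Nat)) : List (List Int) :=
  ps.foldl (fun o p => pvSet8 o p.1 p.2) out

def rowCells (r lo hi : Nat) : List (Nat × Nat) := (pvSeg lo hi).map (fun c => (r, c))
def colCells (c lo hi : Nat) : List (Nat × Nat) := (pvSeg lo hi).map (fun r => (r, c))

def pairCells (p q : Nat × Nat) : List (Nat × Nat) :=
  if p.1 = q.1 then rowCells p.1 (min p.2 q.2) (max p.2 q.2)
  else if p.2 = q.2 then colCells p.2 (min p.1 q.1) (max p.1 q.1)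
  else []

def psA (grid : List (List Int)) : List (Nat × Nat) :=
  (List.range (pvOnes grid).length).flatMap (fun i =>
    (List.range' (i + 1) ((pvOnes grid).length - (i + 1))).flatMap (fun j =>
      pairCells ((pvOnes grid).getD i (0, 0)) ((pvOnes grid).getD j (0, 0))))

def psB (grid : List (List Int)) : List (Nat × Nat) :=
  ((List.range grid.length).flatMap (fun r =>
      if 2 ≤ (pvRowOnes grid r).length then
        rowCells r ((pvRowOnes grid r).headD 0) ((pvRowOnes grid r).getLastD 0) else []))
  ++ ((List.range (grid.headD []).length).flatMap (fun c =>
      if 2 ≤ (pvColOnes grid c).length then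
        colCells c ((pvColOnes grid c).headD 0) ((pvColOnes grid c).getLastD 0) else []))

def InRange (out : List (List Int)) (p : Nat × Nat) : Prop :=
  p.1 < out.length ∧ p.2 < (out.getD p.1 []).length

def CellSpec (grid : List (List Int)) (r c : Nat) : Prop :=
  (r < grid.length ∧ ∃ a ∈ pvRowOnes grid r, ∃ b ∈ pvRowOnes grid r, a < c ∧ c < b)
  ∨ (c < (grid.headD []).length ∧ ∃ a ∈ pvColOnes grid c, ∃ b ∈ pvColOnes grid c, a < r ∧ r < b)

theorem length_set8 (out : List (List Int)) (r c : Nat) :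
    (pvSet8 out r c).length = out.length := by
  simp [pvSet8]

theorem rowlen_set8 (out : List (List Int)) (r c r' : Nat) :
    ((pvSet8 out r c).getD r' []).length = (out.getD r' []).length := by
  simp only [pvSet8, List.getD_eq_getElem?_getD, List.getElem?_modify]
  cases out[r']? with
  | none => rfl
  | some row => by_cases h : r = r' <;> simp [h]

theorem cell_set8_ne (out : List (List Int)) (r c r' c' : Nat) (h : ¬(r' = r ∧ c' = c)) :
    pvCell (pvSet8 out r c) r' c' = pvCell out r' c' := by
  simp only [pvCell, pvSet8, List.getD_eq_getElem?_getD, List.getElem?_modify]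
  by_cases hr : r = r'
  · subst hr
    have hc : ¬ (c = c') := fun hc => h ⟨rfl, hc.symm⟩
    cases out[r]? with
    | none => rfl
    | some row => simp [hc]
  · cases out[r']? <;> simp [hr]

theorem cell_set8_self (out : List (List Int)) (r c : Nat)
    (h1 : r < out.length) (h2 : c < (out.getD r []).length) :
    pvCell (pvSet8 out r c) r c = if pvCell out r c = 0 then 8 else pvCell out r c := by
  have hrow : out.getD r [] = out[r] := by
    rw [List.getD_eq_getElem?_getD, List.getElem?_eq_getElem h1, Option.getD_some]
  have h2' : c < out[r].length := by rwa [hrow] at h2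
  simp [pvCell, pvSet8, List.getD_eq_getElem?_getD,
    List.getElem?_eq_getElem h1, List.getElem?_eq_getElem h2']

theorem inRange_set8 (out : List (List Int)) (r c : Nat) (q : Nat × Nat) :
    InRange (pvSet8 out r c) q ↔ InRange out q := by
  unfold InRange; rw [length_set8, rowlen_set8]

theorem length_applyCells (out : List (List Int)) (ps : List (Nat × Nat)) :
    (applyCells out ps).length = out.length := by
  induction ps generalizing out with
  | nil => rfl
  | cons p t ih =>
    simp only [applyCells, List.foldl_cons] at *
    rw [ih, length_set8]

theorem rowlen_applyCells (out : List (List Int)) (ps : List (Nat × Nat)) (r : Nat) :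
    ((applyCells out ps).getD r []).length = (out.getD r []).length := by
  induction ps generalizing out with
  | nil => rfl
  | cons p t ih =>
    simp only [applyCells, List.foldl_cons] at *
    rw [ih, rowlen_set8]

theorem cell_applyCells (out : List (List Int)) (ps : List (Nat × Nat))
    (h : ∀ p ∈ ps, InRange out p) (r c : Nat) :
    pvCell (applyCells out ps) r c =
      if (r, c) ∈ ps ∧ pvCell out r c = 0 then 8 else pvCell out r c := by
  induction ps generalizing out with
  | nil => simp [applyCells]
  | cons p t ih =>
    simp only [applyCells, List.foldl_cons] at *
    rw [ih (pvSet8 out p.1 p.2)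
        (fun q hq => (inRange_set8 out p.1 p.2 q).mpr (h q (List.mem_cons_of_mem _ hq)))]
    by_cases hp : (r, c) = p
    · have hin := h p List.mem_cons_self
      rw [← hp] at hin
      obtain ⟨hin1, hin2⟩ := hin
      rw [← hp]
      rw [cell_set8_self out r c hin1 hin2]
      by_cases h0 : pvCell out r c = 0
      · simp [h0]
      · simp [h0]
    · rw [cell_set8_ne out p.1 p.2 r c (fun hrc => hp (by cases p; simp_all))]
      have hmc : ((r, c) ∈ p :: t) ↔ ((r, c) ∈ t) := by
        simp [List.mem_cons, hp]
      simp only [hmc]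

theorem applyCells_append (out : List (List Int)) (ps qs : List (Nat × Nat)) :
    applyCells out (ps ++ qs) = applyCells (applyCells out ps) qs := by
  simp [applyCells, List.foldl_append]

theorem foldl_applyCells {α : Type} (l : List α) (f : α → List (Nat × Nat))
    (body : List (List Int) → α → List (List Int))
    (hb : ∀ out x, body out x = applyCells out (f x)) (out : List (List Int)) :
    l.foldl body out = applyCells out (l.flatMap f) := by
  induction l generalizing out with
  | nil => rfl
  | cons a t ih => simp only [List.foldl_cons, List.flatMap_cons, applyCells_append, hb, ih]

theorem fillRow_eq (out : List (List Int)) (r lo hi : Nat) :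
    pvFillRow out r lo hi = applyCells out (rowCells r lo hi) := by
  simp [pvFillRow, applyCells, rowCells, List.foldl_map]

theorem fillCol_eq (out : List (List Int)) (c lo hi : Nat) :
    pvFillCol out c lo hi = applyCells out (colCells c lo hi) := by
  simp [pvFillCol, applyCells, colCells, List.foldl_map]

theorem A_eq (grid : List (List Int)) : solve_dbc1a6ce grid = applyCells grid (psA grid) := by
  simp only [solve_dbc1a6ce, psA]
  refine foldl_applyCells _ _ _ (fun out i => ?_) grid
  refine foldl_applyCells _ _ _ (fun out' j => ?_) out
  simp only [pairCells]
  split_ifs with h1 h2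
  · exact fillRow_eq _ _ _ _
  · exact fillCol_eq _ _ _ _
  · rfl

theorem B_eq (grid : List (List Int)) :
    solve_dbc1a6ce_alt grid = applyCells grid (psB grid) := by
  have h1 := foldl_applyCells (List.range grid.length)
    (fun r => if 2 ≤ (pvRowOnes grid r).length then
        rowCells r ((pvRowOnes grid r).headD 0) ((pvRowOnes grid r).getLastD 0) else [])
    (fun out r => if 2 ≤ (pvRowOnes grid r).length then
        pvFillRow out r ((pvRowOnes grid r).headD 0) ((pvRowOnes grid r).getLastD 0) else out)
    (fun out r => by
      dsimp only
      split_ifs with h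
      · exact fillRow_eq _ _ _ _
      · rfl) grid
  have h2 := foldl_applyCells (List.range (grid.headD []).length)
    (fun c => if 2 ≤ (pvColOnes grid c).length then
        colCells c ((pvColOnes grid c).headD 0) ((pvColOnes grid c).getLastD 0) else [])
    (fun out c => if 2 ≤ (pvColOnes grid c).length then
        pvFillCol out c ((pvColOnes grid c).headD 0) ((pvColOnes grid c).getLastD 0) else out)
    (fun out c => by
      dsimp only
      split_ifs with h
      · exact fillCol_eq _ _ _ _
      · rfl)
  simp only [solve_dbc1a6ce_alt, psB]
  rw [applyCells_append, h1, h2]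

theorem mem_pvSeg (lo hi x : Nat) : x ∈ pvSeg lo hi ↔ lo < x ∧ x < hi := by
  rw [pvSeg, List.mem_range'_1]; omega

theorem mem_rowCells (r lo hi r' c' : Nat) :
    (r', c') ∈ rowCells r lo hi ↔ r' = r ∧ lo < c' ∧ c' < hi := by
  simp only [rowCells, List.mem_map, Prod.mk.injEq, mem_pvSeg]
  constructor
  · rintro ⟨x, hx, hr, hc⟩; exact ⟨hr.symm, hc ▸ hx⟩
  · rintro ⟨hr, h⟩; exact ⟨c', h, hr.symm, rfl⟩

theorem mem_colCells (c lo hi r' c' : Nat) :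
    (r', c') ∈ colCells c lo hi ↔ c' = c ∧ lo < r' ∧ r' < hi := by
  simp only [colCells, List.mem_map, Prod.mk.injEq, mem_pvSeg]
  constructor
  · rintro ⟨x, hx, hr, hc⟩; exact ⟨hc.symm, hr ▸ hx⟩
  · rintro ⟨hc, h⟩; exact ⟨r', h, rfl, hc.symm⟩

theorem mem_pvRowOnes (grid : List (List Int)) (r c : Nat) :
    c ∈ pvRowOnes grid r ↔ c < (grid.headD []).length ∧ pvCell grid r c = 1 := by
  simp [pvRowOnes]

theorem mem_pvColOnes (grid : List (List Int)) (c r : Nat) :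
    r ∈ pvColOnes grid c ↔ r < grid.length ∧ pvCell grid r c = 1 := by
  simp [pvColOnes]

theorem mem_pvOnes (grid : List (List Int)) (r c : Nat) :
    (r, c) ∈ pvOnes grid ↔ r < grid.length ∧ c ∈ pvRowOnes grid r := by
  simp only [pvOnes, List.mem_flatMap, List.mem_range, List.mem_map, Prod.mk.injEq]
  constructor
  · rintro ⟨r', hr', x, hx, hr, hc⟩; exact ⟨hr ▸ hr', hc ▸ hr ▸ hx⟩
  · rintro ⟨hr, hc⟩; exact ⟨r, hr, c, hc, rfl, rfl⟩

theorem pairCells_comm (p q : Nat × Nat) : pairCells p q = pairCells q p := by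
  obtain ⟨p1, p2⟩ := p; obtain ⟨q1, q2⟩ := q
  simp only [pairCells]
  by_cases h1 : p1 = q1
  · simp [h1, Nat.min_comm, Nat.max_comm]
  · have h1' : ¬ q1 = p1 := fun h => h1 h.symm
    by_cases h2 : p2 = q2
    · simp [h1, h1', h2, Nat.min_comm, Nat.max_comm]
    · have h2' : ¬ q2 = p2 := fun h => h2 h.symm
      simp [h1, h1', h2, h2']

theorem pairCells_spec (grid : List (List Int)) (p q : Nat × Nat) (r c : Nat)
    (hp : p ∈ pvOnes grid) (hq : q ∈ pvOnes grid) (h : (r, c) ∈ pairCells p q) :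
    CellSpec grid r c := by
  obtain ⟨p1, p2⟩ := p; obtain ⟨q1, q2⟩ := q
  rw [mem_pvOnes] at hp hq
  simp only [pairCells] at h
  split_ifs at h with h1 h2
  · simp only at h1
    rw [mem_rowCells] at h
    obtain ⟨hr, hlo, hhi⟩ := h
    subst hr; subst h1
    left
    refine ⟨hp.1, min p2 q2, ?_, max p2 q2, ?_, hlo, hhi⟩
    · rcases Nat.le_total p2 q2 with hle | hle
      · rw [Nat.min_eq_left hle]; exact hp.2
      · rw [Nat.min_eq_right hle]; exact hq.2
    · rcases Nat.le_total p2 q2 with hle | hle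
      · rw [Nat.max_eq_right hle]; exact hq.2
      · rw [Nat.max_eq_left hle]; exact hp.2
  · simp only at h2
    rw [mem_colCells] at h
    obtain ⟨hc, hlo, hhi⟩ := h
    subst hc
    right
    have hq2m : c ∈ pvRowOnes grid q1 := by rw [h2]; exact hq.2
    have hp2 := (mem_pvRowOnes grid p1 c).mp hp.2
    have hq2 := (mem_pvRowOnes grid q1 c).mp hq2m
    refine ⟨hp2.1, min p1 q1, ?_, max p1 q1, ?_, hlo, hhi⟩
    · rcases Nat.le_total p1 q1 with hle | hle
      · rw [Nat.min_eq_left hle]; exact (mem_pvColOnes grid c p1).mpr ⟨hp.1, hp2.2⟩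
      · rw [Nat.min_eq_right hle]; exact (mem_pvColOnes grid c q1).mpr ⟨hq.1, hq2.2⟩
    · rcases Nat.le_total p1 q1 with hle | hle
      · rw [Nat.max_eq_right hle]; exact (mem_pvColOnes grid c q1).mpr ⟨hq.1, hq2.2⟩
      · rw [Nat.max_eq_left hle]; exact (mem_pvColOnes grid c p1).mpr ⟨hp.1, hp2.2⟩
  · exact absurd h (List.not_mem_nil)

theorem pairCells_row (r a b : Nat) :
    pairCells (r, a) (r, b) = rowCells r (min a b) (max a b) := by
  simp [pairCells]

theorem pairCells_col (a b c : Nat) (h : ¬ a = b) :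
    pairCells (a, c) (b, c) = colCells c (min a b) (max a b) := by
  simp [pairCells, h]

theorem mem_psA_of_pair (grid : List (List Int)) (p q : Nat × Nat) (r c : Nat)
    (hp : p ∈ pvOnes grid) (hq : q ∈ pvOnes grid) (hne : p ≠ q)
    (hm : (r, c) ∈ pairCells p q) : (r, c) ∈ psA grid := by
  obtain ⟨i, hi, hieq⟩ := List.getElem_of_mem hp
  obtain ⟨j, hj, hjeq⟩ := List.getElem_of_mem hq
  have hij : i ≠ j := by
    intro e; subst e; rw [hieq] at hjeq; exact hne hjeq
  have hgi : (pvOnes grid).getD i (0, 0) = p := by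
    rw [List.getD_eq_getElem?_getD, List.getElem?_eq_getElem hi, Option.getD_some, hieq]
  have hgj : (pvOnes grid).getD j (0, 0) = q := by
    rw [List.getD_eq_getElem?_getD, List.getElem?_eq_getElem hj, Option.getD_some, hjeq]
  simp only [psA, List.mem_flatMap, List.mem_range, List.mem_range'_1]
  rcases Nat.lt_or_lt_of_ne hij with hlt | hlt
  · exact ⟨i, hi, j, ⟨by omega, by omega⟩, by rw [hgi, hgj]; exact hm⟩
  · exact ⟨j, hj, i, ⟨by omega, by omega⟩, by rw [hgi, hgj, pairCells_comm]; exact hm⟩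

theorem mem_psA_iff (grid : List (List Int)) (r c : Nat) :
    (r, c) ∈ psA grid ↔ CellSpec grid r c := by
  constructor
  · intro h
    simp only [psA, List.mem_flatMap, List.mem_range, List.mem_range'_1] at h
    obtain ⟨i, hi, j, hj, hmem⟩ := h
    have hj' : j < (pvOnes grid).length := by omega
    have hpi : (pvOnes grid).getD i (0, 0) ∈ pvOnes grid := by
      rw [List.getD_eq_getElem?_getD, List.getElem?_eq_getElem hi, Option.getD_some]
      exact List.getElem_mem _
    have hpj : (pvOnes grid).getD j (0, 0) ∈ pvOnes grid := by
      rw [List.getD_eq_getElem?_getD, List.getElem?_eq_getElem hj', Option.getD_some]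
      exact List.getElem_mem _
    exact pairCells_spec grid _ _ r c hpi hpj hmem
  · intro h
    rcases h with ⟨hr, a, ha, b, hb, hac, hcb⟩ | ⟨hc, a, ha, b, hb, har, hrb⟩
    · refine mem_psA_of_pair grid (r, a) (r, b) r c ((mem_pvOnes grid r a).mpr ⟨hr, ha⟩)
        ((mem_pvOnes grid r b).mpr ⟨hr, hb⟩) (by simp; omega) ?_
      rw [pairCells_row, mem_rowCells]
      exact ⟨rfl, by omega, by omega⟩
    · have ha' := (mem_pvColOnes grid c a).mp ha
      have hb' := (mem_pvColOnes grid c b).mp hb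
      refine mem_psA_of_pair grid (a, c) (b, c) r c
        ((mem_pvOnes grid a c).mpr ⟨ha'.1, (mem_pvRowOnes grid a c).mpr ⟨hc, ha'.2⟩⟩)
        ((mem_pvOnes grid b c).mpr ⟨hb'.1, (mem_pvRowOnes grid b c).mpr ⟨hc, hb'.2⟩⟩)
        (by simp; omega) ?_
      rw [pairCells_col a b c (by omega), mem_colCells]
      exact ⟨rfl, by omega, by omega⟩

theorem pw_headD_le (cs : List Nat) (h : cs.Pairwise (· < ·)) (a : Nat) (ha : a ∈ cs) :
    cs.headD 0 ≤ a := by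
  cases cs with
  | nil => cases ha
  | cons y t =>
    rcases List.mem_cons.mp ha with rfl | hat
    · exact Nat.le_refl _
    · exact Nat.le_of_lt ((List.pairwise_cons.mp h).1 a hat)

theorem pw_le_getLastD : ∀ (cs : List Nat), cs.Pairwise (· < ·) → ∀ a ∈ cs, a ≤ cs.getLastD 0
  | [], _, a, ha => by cases ha
  | [y], _, a, ha => by
    rcases List.mem_cons.mp ha with rfl | h
    · exact Nat.le_refl _
    · cases h
  | y :: z :: t, h, a, ha => by
    have hpw := List.pairwise_cons.mp h
    have hgl : (y :: z :: t).getLastD 0 = (z :: t).getLastD 0 := by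
      simp [List.getLastD_eq_getLast?, List.getLast?_cons_cons]
    rw [hgl]
    rcases List.mem_cons.mp ha with rfl | hat
    · exact Nat.le_of_lt (Nat.lt_of_lt_of_le (hpw.1 z List.mem_cons_self)
        (pw_le_getLastD (z :: t) hpw.2 z List.mem_cons_self))
    · exact pw_le_getLastD (z :: t) hpw.2 a hat

theorem two_le_length (cs : List Nat) (a b : Nat) (ha : a ∈ cs) (hb : b ∈ cs) (hne : a ≠ b) :
    2 ≤ cs.length := by
  match cs with
  | [] => cases ha
  | [y] =>
    have h1 : a = y := by simpa using ha
    have h2 : b = y := by simpa using hb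
    exact absurd (h1.trans h2.symm) hne
  | y :: z :: t =>
    simp only [List.length_cons]
    omega

theorem between_iff (cs : List Nat) (h : cs.Pairwise (· < ·)) (x : Nat) :
    (∃ a ∈ cs, ∃ b ∈ cs, a < x ∧ x < b) ↔
      (2 ≤ cs.length ∧ cs.headD 0 < x ∧ x < cs.getLastD 0) := by
  constructor
  · rintro ⟨a, ha, b, hb, h1, h2⟩
    refine ⟨two_le_length cs a b ha hb (by omega), ?_, ?_⟩
    · exact Nat.lt_of_le_of_lt (pw_headD_le cs h a ha) h1
    · exact Nat.lt_of_lt_of_le h2 (pw_le_getLastD cs h b hb)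
  · rintro ⟨hlen, h1, h2⟩
    have hne : cs ≠ [] := by intro e; subst e; simp at hlen
    refine ⟨cs.headD 0, ?_, cs.getLastD 0, ?_, h1, h2⟩
    · cases cs with
      | nil => cases hne rfl
      | cons y t => exact List.mem_cons_self
    · rw [List.getLastD_eq_getLast?, List.getLast?_eq_some_getLast hne, Option.getD_some]
      exact List.getLast_mem hne

theorem rowOnes_pairwise (grid : List (List Int)) (r : Nat) :
    (pvRowOnes grid r).Pairwise (· < ·) :=
  List.Pairwise.filter _ List.pairwise_lt_range

theorem colOnes_pairwise (grid : List (List Int)) (c : Nat) :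
    (pvColOnes grid c).Pairwise (· < ·) :=
  List.Pairwise.filter _ List.pairwise_lt_range

theorem mem_psB_iff (grid : List (List Int)) (r c : Nat) :
    (r, c) ∈ psB grid ↔ CellSpec grid r c := by
  simp only [psB, List.mem_append, List.mem_flatMap, List.mem_range, CellSpec]
  refine or_congr ?_ ?_
  · constructor
    · rintro ⟨r', hr', hm⟩
      split_ifs at hm with h2
      · rw [mem_rowCells] at hm
        obtain ⟨rfl, hlo, hhi⟩ := hm
        exact ⟨hr', (between_iff _ (rowOnes_pairwise grid r) c).mpr ⟨h2, hlo, hhi⟩⟩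
      · cases hm
    · rintro ⟨hr, hb⟩
      obtain ⟨hlen, h1, h2⟩ := (between_iff _ (rowOnes_pairwise grid r) c).mp hb
      exact ⟨r, hr, by rw [if_pos hlen, mem_rowCells]; exact ⟨rfl, h1, h2⟩⟩
  · constructor
    · rintro ⟨c', hc', hm⟩
      split_ifs at hm with h2
      · rw [mem_colCells] at hm
        obtain ⟨rfl, hlo, hhi⟩ := hm
        exact ⟨hc', (between_iff _ (colOnes_pairwise grid c) r).mpr ⟨h2, hlo, hhi⟩⟩
      · cases hm
    · rintro ⟨hc, hb⟩
      obtain ⟨hlen, h1, h2⟩ := (between_iff _ (colOnes_pairwise grid c) r).mp hb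
      exact ⟨c, hc, by rw [if_pos hlen, mem_colCells]; exact ⟨rfl, h1, h2⟩⟩

theorem row_mem_grid (grid : List (List Int)) (r : Nat) (hr : r < grid.length) :
    grid.getD r [] ∈ grid := by
  rw [List.getD_eq_getElem?_getD, List.getElem?_eq_getElem hr, Option.getD_some]
  exact List.getElem_mem _

theorem cellSpec_inRange (grid : List (List Int)) (r c : Nat)
    (hpre : Pre_solve_dbc1a6ce grid) (h : CellSpec grid r c) : InRange grid (r, c) := by
  obtain ⟨-, hlen⟩ := hpre
  rcases h with ⟨hr, a, ha, b, hb, h1, h2⟩ | ⟨hc, a, ha, b, hb, h1, h2⟩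
  · have hbcols := ((mem_pvRowOnes grid r b).mp hb).1
    have hrow := hlen _ (row_mem_grid grid r hr)
    refine ⟨hr, ?_⟩
    show c < (grid.getD r []).length
    omega
  · have hblt := ((mem_pvColOnes grid c b).mp hb).1
    have hr : r < grid.length := by omega
    have hrow := hlen _ (row_mem_grid grid r hr)
    refine ⟨hr, ?_⟩
    show c < (grid.getD r []).length
    omega

theorem eq_of_cell_eq (a b : List (List Int)) (hlen : a.length = b.length)
    (hrow : ∀ r, (a.getD r []).length = (b.getD r []).length)
    (hcell : ∀ r c, pvCell a r c = pvCell b r c) : a = b := by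
  apply List.ext_getElem hlen
  intro i h1 h2
  have e1 : a.getD i [] = a[i] := by
    rw [List.getD_eq_getElem?_getD, List.getElem?_eq_getElem h1, Option.getD_some]
  have e2 : b.getD i [] = b[i] := by
    rw [List.getD_eq_getElem?_getD, List.getElem?_eq_getElem h2, Option.getD_some]
  apply List.ext_getElem
  · have := hrow i; rwa [e1, e2] at this
  · intro j hj1 hj2
    have := hcell i j
    rwa [pvCell, pvCell, e1, e2, List.getD_eq_getElem?_getD, List.getD_eq_getElem?_getD,
      List.getElem?_eq_getElem hj1, List.getElem?_eq_getElem hj2,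
      Option.getD_some, Option.getD_some] at this

-- ===== VERDICT (by name: the statement is the Claim_ definition above) =====
theorem solve_dbc1a6ce_spec : Claim_equal_solve_dbc1a6ce := by
  intro grid _hdom hpre
  unfold Spec_solve_dbc1a6ce
  rw [A_eq, B_eq]
  apply eq_of_cell_eq
  · rw [length_applyCells, length_applyCells]
  · intro r; rw [rowlen_applyCells, rowlen_applyCells]
  · intro r c
    rw [cell_applyCells _ _ (fun p hp => by
          obtain ⟨pr, pc⟩ := p
          exact cellSpec_inRange grid pr pc hpre ((mem_psA_iff grid pr pc).mp hp)),
        cell_applyCells _ _ (fun p hp => by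
          obtain ⟨pr, pc⟩ := p
          exact cellSpec_inRange grid pr pc hpre ((mem_psB_iff grid pr pc).mp hp))]
    by_cases h0 : pvCell grid r c = 0
    · by_cases hA : (r, c) ∈ psA grid
      · have hB : (r, c) ∈ psB grid := (mem_psB_iff grid r c).mpr ((mem_psA_iff grid r c).mp hA)
        rw [if_pos ⟨hA, h0⟩, if_pos ⟨hB, h0⟩]
      · have hB : ¬ (r, c) ∈ psB grid := fun h => hA ((mem_psA_iff grid r c).mpr ((mem_psB_iff grid r c).mp h))
        rw [if_neg (fun h => hA h.1), if_neg (fun h => hB h.1)]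
    · rw [if_neg (fun h => h0 h.2), if_neg (fun h => h0 h.2)]
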